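-- pv_equiv track=rewrite | github.com/clejae/alkis_analysis | 03_owner_name_classification.py | check_occ_of_words2
-- ===== SOURCE A (Python) =====
-- def check_occ_of_words2(text, search_terms, return_code):
--     """
--     Checks if any of the search terms from the input list occurs in the text, also considers sub parts of words.
--     Example: If the search term is "py" and the text is "python", there will be a match.
--
--     :param text: Input text. String.
--     :param search_terms: List of word that should be looked for. List of strings.
--     :return: Boolean integer. 1: there is a match, 0: there is no match.
--     """
--
--     check = 0
--     if text != None:
--         for search_term in search_terms:
--             if search_term in text:
--                 check = return_code
--                 break
--             else:
--                 pass
--     else: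
--         pass
--
--     return check
-- ===== SOURCE B (Python) =====
-- import re
--
-- def check_occ_of_words2(text, search_terms, return_code):
--     if text is None:
--         return 0
--     if not search_terms:
--         return 0
--     pattern = re.compile("|".join(re.escape(t) for t in search_terms))
--     return return_code if pattern.search(text) else 0
-- ===== Notes on version B (the rewrite author's own statement) =====
-- stated objective: idiomatic
-- what changed: Replaces the per-term loop of `in` checks with a single compiled regex alternation of the escaped terms searched once over the text.
import Mathlib
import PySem

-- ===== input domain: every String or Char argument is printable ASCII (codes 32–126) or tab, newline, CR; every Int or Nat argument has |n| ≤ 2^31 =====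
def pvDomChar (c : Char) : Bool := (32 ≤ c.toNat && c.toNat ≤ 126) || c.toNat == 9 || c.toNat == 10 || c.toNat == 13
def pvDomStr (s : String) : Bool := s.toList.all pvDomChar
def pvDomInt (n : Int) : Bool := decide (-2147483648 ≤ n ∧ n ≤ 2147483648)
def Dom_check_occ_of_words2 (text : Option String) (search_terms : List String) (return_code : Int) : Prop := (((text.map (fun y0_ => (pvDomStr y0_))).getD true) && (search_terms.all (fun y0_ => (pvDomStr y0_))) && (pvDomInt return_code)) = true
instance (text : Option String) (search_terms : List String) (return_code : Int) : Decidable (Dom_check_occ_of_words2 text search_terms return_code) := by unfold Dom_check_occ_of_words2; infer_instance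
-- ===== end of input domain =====

-- B replaces A's per-term loop of `in` checks by one regex alternation of the escaped
-- terms searched once over the text (objective: idiomatic).
-- ===== PORT A =====
-- the for-loop with `break`: check stays 0 until the first term that is a substring
def pvLoopA (txt : String) (search_terms : List String) (return_code : Int) (check : Int) : Int :=
  match search_terms with
  | [] => check
  | t :: rest =>
      if PySem.Str.isIn t txt then return_code   -- check = return_code; break
      else pvLoopA txt rest return_code check

def check_occ_of_words2 (text : Option String) (search_terms : List String) (return_code : Int) : Int :=
  match text with
  | some txt => pvLoopA txt search_terms return_code 0
  | none => 0

-- ===== PORT B =====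
-- re.compile('|'.join(re.escape(t) for t in terms)).search(text) succeeds iff some
-- alternative (a literal, escaped term) occurs as a substring of text.
def check_occ_of_words2_alt (text : Option String) (search_terms : List String) (return_code : Int) : Int :=
  match text with
  | none => 0
  | some txt =>
      if search_terms.isEmpty then 0
      else if search_terms.any (fun t => PySem.Str.isIn t txt) then return_code else 0

-- ===== PRECONDITION & SPEC =====
def Spec_check_occ_of_words2 (text : Option String) (search_terms : List String) (return_code : Int) (out : Int) : Prop := out = check_occ_of_words2_alt text search_terms return_code
instance (text : Option String) (search_terms : List String) (return_code : Int) (out : Int) : Decidable (Spec_check_occ_of_words2 text search_terms return_code out) := by unfold Spec_check_occ_of_words2; infer_instance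

-- ===== CLAIM (what is proved, stated in full; the proofs are below) =====
def Claim_equal_check_occ_of_words2 : Prop := ∀ (text : Option String) (search_terms : List String) (return_code : Int), Dom_check_occ_of_words2 text search_terms return_code → Spec_check_occ_of_words2 text search_terms return_code (check_occ_of_words2 text search_terms return_code)

-- ===== LEMMAS AND PROOFS =====

-- ===== VERDICT (by name: the statement is the Claim_ definition above) =====
lemma pvLoopA_eq (txt : String) (terms : List String) (rc : Int) :
    pvLoopA txt terms rc 0 =
      if terms.any (fun t => PySem.Str.isIn t txt) then rc else 0 := by
  induction terms with
  | nil => simp [pvLoopA]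
  | cons t rest ih =>
      simp only [pvLoopA, List.any_cons, Bool.or_eq_true]
      by_cases h : PySem.Chars.isIn t.toList txt.toList = true <;>
        simp [PySem.Str.isIn_eq, h, ih]

theorem check_occ_of_words2_spec : Claim_equal_check_occ_of_words2 := by
  intro text terms rc _
  unfold Spec_check_occ_of_words2 check_occ_of_words2 check_occ_of_words2_alt
  cases text with
  | none => rfl
  | some txt =>
      simp only []
      rw [pvLoopA_eq]
      cases terms <;> simp [List.isEmpty]
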